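-- pv_equiv track=rewrite | github.com/scyptnex/advent-of-code | p17.py | search
-- ===== SOURCE A (Python) =====
-- def can_apply(cur, cmask, new, nmask):
--     xmask = cmask&nmask
--     return cur&xmask == new&xmask
--
-- def search(pgm, idx, cur, mask):
--     if idx == len(pgm):
--         return cur
--     tgt = pgm[idx]
--     best = -1
--     for i in range(0, 8):
--         ni = i << (3*idx)
--         mi = 7 << (3*idx)
--         if not can_apply(cur, mask, ni, mi):
--             continue
--         ccur = cur | ni
--         cmask = mask |  mi
--         bo = i^1
--         bx = bo^5
--         need = tgt^bx
--         need <<= (bo + 3*idx)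
--         nmask = 7 << (bo + 3*idx)
--         if not can_apply(ccur, cmask, need, nmask):
--             continue
--         nxt = ccur | need
--         nxtmask = cmask | nmask
--         check = search(pgm, idx+1, nxt, nxtmask)
--         if check != -1 and (check < best or best == -1):
--             best = check
--     return best
-- ===== SOURCE B (Python) =====
-- def search(pgm, idx, cur, mask):
--     # Iterative DFS with an explicit stack of partial states and a running best.
--     best = -1
--     stack = [(idx, cur, mask)]
--     while stack:
--         j, c, m = stack.pop()
--         if j == len(pgm):
--             if c != -1 and (best == -1 or c < best):
--                 best = c
--             continue
--         tgt = pgm[j]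
--         for i in range(8):
--             ni = i << (3 * j)
--             mi = 7 << (3 * j)
--             xm = m & mi
--             if c & xm != ni & xm:
--                 continue
--             cc = c | ni
--             cm = m | mi
--             bo = i ^ 1
--             need = (tgt ^ (bo ^ 5)) << (bo + 3 * j)
--             nmask = 7 << (bo + 3 * j)
--             ym = cm & nmask
--             if cc & ym != need & ym:
--                 continue
--             stack.append((j + 1, cc | need, cm | nmask))
--     return best
-- ===== Notes on version B (the rewrite author's own statement) =====
-- stated objective: alternative
-- what changed: The recursive DFS with a per-call best accumulator is replaced by an iterative worklist: an explicit stack of partial states (idx, cur, mask) and a single running best, popping states and pushing surviving children until the stack empties.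
import Mathlib
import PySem

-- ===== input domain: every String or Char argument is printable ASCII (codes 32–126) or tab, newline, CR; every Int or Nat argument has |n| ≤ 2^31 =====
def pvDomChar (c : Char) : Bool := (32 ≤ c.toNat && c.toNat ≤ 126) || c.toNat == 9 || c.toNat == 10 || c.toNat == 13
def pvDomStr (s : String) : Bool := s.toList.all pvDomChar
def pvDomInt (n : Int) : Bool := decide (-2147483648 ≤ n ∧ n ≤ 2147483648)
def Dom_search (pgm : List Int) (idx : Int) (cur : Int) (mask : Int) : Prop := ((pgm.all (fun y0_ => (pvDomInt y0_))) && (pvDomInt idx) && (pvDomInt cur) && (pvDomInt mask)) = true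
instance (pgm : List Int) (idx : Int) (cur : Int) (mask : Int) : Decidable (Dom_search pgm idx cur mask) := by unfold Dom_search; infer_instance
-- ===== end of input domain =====

-- B replaces A's recursive DFS by an iterative worklist (explicit stack of partial
-- states with one running best); same bit arithmetic, different control structure.

-- ===== PORT A =====
def can_apply (cur : Int) (cmask : Int) (new : Int) (nmask : Int) : Bool :=
  let xmask := PySem.Int.band cmask nmask
  PySem.Int.band cur xmask == PySem.Int.band new xmask

-- Fueled transliteration of A's recursion; the wrapper `search` supplies fuel
-- (pgm.length - idx).toNat + 1, which is enough for every recursive call, so the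
-- fuel-0 branch is never reached on any input (it is a totality device only).
def searchFuel (fuel : Nat) (pgm : List Int) (idx : Int) (cur : Int) (mask : Int) : Int :=
  match fuel with
  | 0 => -1  -- unreachable: the wrapper always supplies sufficient fuel
  | fuel + 1 =>
    if idx = (pgm.length : Int) then cur
    else
      match PySem.List.pyGet? pgm idx with
      | none => -1  -- Python raises IndexError here (outside Pre_search)
      | some tgt =>
        if idx < 0 then -1  -- Python raises ValueError (negative shift count) here (outside Pre_search)
        else
          (PySem.List.pyRange 0 8 1).foldl (fun (best : Int) (i : Int) =>
            let ni := i <<< (3 * idx).toNat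
            let mi := (7 : Int) <<< (3 * idx).toNat
            if !(can_apply cur mask ni mi) then best
            else
              let ccur := PySem.Int.bor cur ni
              let cmask := PySem.Int.bor mask mi
              let bo := PySem.Int.bxor i 1
              let bx := PySem.Int.bxor bo 5
              let need := (PySem.Int.bxor tgt bx) <<< (bo + 3 * idx).toNat
              let nmask := (7 : Int) <<< (bo + 3 * idx).toNat
              if !(can_apply ccur cmask need nmask) then best
              else
                let nxt := PySem.Int.bor ccur need
                let nxtmask := PySem.Int.bor cmask nmask
                let check := searchFuel fuel pgm (idx + 1) nxt nxtmask
                if check ≠ -1 ∧ (check < best ∨ best = -1) then check else best) (-1)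

def search (pgm : List Int) (idx : Int) (cur : Int) (mask : Int) : Int :=
  searchFuel (((pgm.length : Int) - idx).toNat + 1) pgm idx cur mask

-- ===== PORT B =====
-- One iteration of Source B's inner `for i` loop body: the surviving child state, if any.
def mkChild? (j : Int) (c : Int) (m : Int) (tgt : Int) (i : Int) : Option (Int × Int × Int) :=
  let ni := i <<< (3 * j).toNat
  let mi := (7 : Int) <<< (3 * j).toNat
  let xm := PySem.Int.band m mi
  if PySem.Int.band c xm ≠ PySem.Int.band ni xm then none
  else
    let cc := PySem.Int.bor c ni
    let cm := PySem.Int.bor m mi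
    let bo := PySem.Int.bxor i 1
    let need := (PySem.Int.bxor tgt (PySem.Int.bxor bo 5)) <<< (bo + 3 * j).toNat
    let nmask := (7 : Int) <<< (bo + 3 * j).toNat
    let ym := PySem.Int.band cm nmask
    if PySem.Int.band cc ym ≠ PySem.Int.band need ym then none
    else some (j + 1, PySem.Int.bor cc need, PySem.Int.bor cm nmask)

-- Source B's `while stack` loop. The Python stack's END (pop/append side) is the HEAD of
-- this list; the i-loop appends its surviving children in order i = 0..7, i.e. it
-- prepends the reversed child list here.
def runB (pgm : List Int) (stack : List (Int × Int × Int)) (best : Int) : Int :=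
  match stack with
  | [] => best
  | (j, c, m) :: rest =>
    if j = (pgm.length : Int) then
      runB pgm rest (if c ≠ -1 ∧ (best = -1 ∨ c < best) then c else best)
    else
      match hg : PySem.List.pyGet? pgm j with
      | none => runB pgm rest best  -- Python raises IndexError here (outside Pre_search)
      | some tgt =>
        if hj : j < 0 then runB pgm rest best  -- Python raises ValueError here (outside Pre_search)
        else runB pgm (((PySem.List.pyRange 0 8 1).filterMap (mkChild? j c m tgt)).reverse ++ rest) best
termination_by (stack.map (fun s => 9 ^ (((pgm.length : Int) - s.1).toNat))).sum
decreasing_by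
  · simp only [List.map_cons, List.sum_cons]
    have : 0 < 9 ^ (((pgm.length : Int) - j).toNat) := pow_pos (by omega) _
    omega
  · simp only [List.map_cons, List.sum_cons]
    have : 0 < 9 ^ (((pgm.length : Int) - j).toNat) := pow_pos (by omega) _
    omega
  · simp only [List.map_cons, List.sum_cons]
    have : 0 < 9 ^ (((pgm.length : Int) - j).toNat) := pow_pos (by omega) _
    omega
  · -- expansion step: a state of weight 9^(k+1) is replaced by ≤ 8 children of weight 9^k
    simp only [List.map_cons, List.sum_cons, List.map_append, List.sum_append, List.map_reverse,
      List.sum_reverse]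
    have hjlt : j < (pgm.length : Int) := by
      by_contra hge
      have : PySem.List.pyGet? pgm j = none := by
        rw [PySem.List.pyGet?_eq_none_iff]
        intro hin
        rcases hin with ⟨_, h2⟩
        omega
      simp [this] at hg
    have hk : (((pgm.length : Int) - j).toNat) = (((pgm.length : Int) - (j + 1)).toNat) + 1 := by omega
    set w : Nat := 9 ^ (((pgm.length : Int) - (j + 1)).toNat) with hw
    have hwpos : 0 < w := pow_pos (by omega) _
    have hfst : ∀ s ∈ (PySem.List.pyRange 0 8 1).filterMap (mkChild? j c m tgt),
        s.1 = j + 1 := by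
      intro s hs
      rcases List.mem_filterMap.mp hs with ⟨i, _, hmk⟩
      unfold mkChild? at hmk
      simp only at hmk
      split_ifs at hmk <;> (try cases hmk) <;> simp_all
    have hlen : ((PySem.List.pyRange 0 8 1).filterMap (mkChild? j c m tgt)).length ≤ 8 := by
      calc ((PySem.List.pyRange 0 8 1).filterMap (mkChild? j c m tgt)).length
          ≤ (PySem.List.pyRange 0 8 1).length := List.length_filterMap_le _ _
        _ = 8 := by decide
    have hsum : ((((PySem.List.pyRange 0 8 1).filterMap (mkChild? j c m tgt))).map
        (fun s => 9 ^ (((pgm.length : Int) - s.1).toNat))).sum ≤ 8 * w := by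
      have hrep : ∀ x ∈ ((((PySem.List.pyRange 0 8 1).filterMap (mkChild? j c m tgt))).map
          (fun s => 9 ^ (((pgm.length : Int) - s.1).toNat))), x = w := by
        intro x hx
        rcases List.mem_map.mp hx with ⟨s, hs, rfl⟩
        rw [hfst s hs]
      calc ((((PySem.List.pyRange 0 8 1).filterMap (mkChild? j c m tgt))).map
            (fun s => 9 ^ (((pgm.length : Int) - s.1).toNat))).sum
          = ((((PySem.List.pyRange 0 8 1).filterMap (mkChild? j c m tgt))).map
            (fun s => 9 ^ (((pgm.length : Int) - s.1).toNat))).length * w := by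
            rw [List.eq_replicate_of_mem hrep, List.sum_replicate, List.length_replicate,
              smul_eq_mul]
        _ ≤ 8 * w := Nat.mul_le_mul (by simpa using hlen) (le_refl w)
    rw [hk, pow_succ]
    omega

def search_alt (pgm : List Int) (idx : Int) (cur : Int) (mask : Int) : Int :=
  runB pgm [(idx, cur, mask)] (-1)

-- ===== PRECONDITION & SPEC =====
-- Python's search raises unless 0 ≤ idx ≤ len(pgm): for idx > len(pgm) pgm[idx] is an
-- IndexError, and for idx < 0 the shift `i << 3*idx` is a ValueError.
def Pre_search (pgm : List Int) (idx : Int) (cur : Int) (mask : Int) : Prop :=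
  0 ≤ idx ∧ idx ≤ (pgm.length : Int)
instance (pgm : List Int) (idx : Int) (cur : Int) (mask : Int) : Decidable (Pre_search pgm idx cur mask) := by unfold Pre_search; infer_instance

def pvWitness_search : List Int × Int × Int × Int := ([3, 5], 0, 0, 0)

def Spec_search (pgm : List Int) (idx : Int) (cur : Int) (mask : Int) (out : Int) : Prop := out = search_alt pgm idx cur mask
instance (pgm : List Int) (idx : Int) (cur : Int) (mask : Int) (out : Int) : Decidable (Spec_search pgm idx cur mask out) := by unfold Spec_search; infer_instance

-- ===== CLAIM (what is proved, stated in full; the proofs are below) =====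
def Claim_equal_search : Prop := ∀ (pgm : List Int) (idx : Int) (cur : Int) (mask : Int), Dom_search pgm idx cur mask → Pre_search pgm idx cur mask → Spec_search pgm idx cur mask (search pgm idx cur mask)

-- ===== LEMMAS AND PROOFS =====

-- `merge b c` is A's best-update: take c if it is a real (≠ -1) result better than b.
def merge (b : Int) (c : Int) : Int :=
  if c ≠ -1 ∧ (c < b ∨ b = -1) then c else b

theorem merge_neg_right (b : Int) : merge b (-1) = b := by
  unfold merge; split_ifs <;> omega

theorem merge_neg_left (c : Int) : merge (-1) c = c := by
  unfold merge; split_ifs <;> omega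

theorem merge_comm (a b : Int) : merge a b = merge b a := by
  unfold merge; split_ifs <;> omega

theorem merge_assoc (a b c : Int) : merge (merge a b) c = merge a (merge b c) := by
  unfold merge; split_ifs <;> omega

-- A's value of a state, as a function of the state triple.
def aval (pgm : List Int) (s : Int × Int × Int) : Int := search pgm s.1 s.2.1 s.2.2

theorem search_complete (pgm : List Int) (cur mask : Int) :
    search pgm (pgm.length : Int) cur mask = cur := by
  unfold search searchFuel
  simp

theorem mkChild?_fst (j c m tgt i : Int) (s : Int × Int × Int)
    (h : mkChild? j c m tgt i = some s) : s.1 = j + 1 := by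
  unfold mkChild? at h
  simp only at h
  split_ifs at h <;> (try cases h) <;> simp_all

-- A generic reshaping of a guarded loop: folding a body that acts only on the
-- surviving children equals folding `merge` over the filterMap of the children.
theorem foldl_guard_filterMap {α σ : Type} (g : α → Option σ) (v : σ → Int)
    (body : Int → α → Int)
    (hbody : ∀ b i, body b i = match g i with | some s => merge b (v s) | none => b) :
    ∀ (l : List α) (a : Int),
      l.foldl body a = (l.filterMap g).foldl (fun b s => merge b (v s)) a := by
  intro l
  induction l with
  | nil => intro a; rfl
  | cons x xs ih =>
    intro a
    rw [List.foldl_cons, hbody a x]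
    cases hx : g x with
    | none => simp only [List.filterMap_cons, hx, ih]
    | some s => simp only [List.filterMap_cons, hx, List.foldl_cons, ih]

-- Factor the seed out of a merge-fold.
theorem foldl_merge_factor (v : (Int × Int × Int) → Int) :
    ∀ (l : List (Int × Int × Int)) (a : Int),
      l.foldl (fun b s => merge b (v s)) a = merge a (l.foldl (fun b s => merge b (v s)) (-1)) := by
  intro l
  induction l with
  | nil => intro a; simp [merge_neg_right]
  | cons x xs ih =>
    intro a
    rw [List.foldl_cons, List.foldl_cons, ih (merge a (v x)), ih (merge (-1) (v x)),
      merge_neg_left, merge_assoc]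

-- A merge-fold is order-insensitive: reversing the list does not change it.
theorem foldl_merge_reverse (v : (Int × Int × Int) → Int) :
    ∀ (l : List (Int × Int × Int)),
      l.reverse.foldl (fun b s => merge b (v s)) (-1) = l.foldl (fun b s => merge b (v s)) (-1) := by
  intro l
  induction l with
  | nil => rfl
  | cons x xs ih =>
    rw [List.reverse_cons, List.foldl_append]
    simp only [List.foldl_cons, List.foldl_nil]
    rw [ih, merge_neg_left, foldl_merge_factor v xs (v x)]
    exact merge_comm _ _

-- Unfold one level of A at an expandable state, with symbolic inner fuel.
theorem searchFuel_expand (pgm : List Int) (j c m tgt : Int) (G : Nat)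
    (h0 : 0 ≤ j) (hjlt : j < (pgm.length : Int)) (hg : PySem.List.pyGet? pgm j = some tgt) :
    searchFuel (G + 1) pgm j c m =
      ((PySem.List.pyRange 0 8 1).filterMap (mkChild? j c m tgt)).foldl
        (fun b s => merge b (searchFuel G pgm s.1 s.2.1 s.2.2)) (-1) := by
  conv_lhs => rw [searchFuel]
  rw [if_neg (by omega), hg]
  simp only
  rw [if_neg (show ¬ j < 0 by omega)]
  refine foldl_guard_filterMap (mkChild? j c m tgt)
    (fun s => searchFuel G pgm s.1 s.2.1 s.2.2) _ ?_ _ _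
  intro b i
  simp only [can_apply, mkChild?, merge]
  by_cases h1 : PySem.Int.band c (PySem.Int.band m ((7 : Int) <<< (3 * j).toNat)) =
      PySem.Int.band (i <<< (3 * j).toNat) (PySem.Int.band m ((7 : Int) <<< (3 * j).toNat))
  · by_cases h2 : PySem.Int.band (PySem.Int.bor c (i <<< (3 * j).toNat))
        (PySem.Int.band (PySem.Int.bor m ((7 : Int) <<< (3 * j).toNat))
          ((7 : Int) <<< (PySem.Int.bxor i 1 + 3 * j).toNat)) =
      PySem.Int.band ((PySem.Int.bxor tgt (PySem.Int.bxor (PySem.Int.bxor i 1) 5)) <<<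
          (PySem.Int.bxor i 1 + 3 * j).toNat)
        (PySem.Int.band (PySem.Int.bor m ((7 : Int) <<< (3 * j).toNat))
          ((7 : Int) <<< (PySem.Int.bxor i 1 + 3 * j).toNat))
    · simp [h1, h2]
    · simp [h1, h2]
  · simp [h1]

-- A's value at an expandable state is the merge-fold of A's values over exactly the
-- children B pushes.
theorem search_expand (pgm : List Int) (j c m tgt : Int)
    (h0 : 0 ≤ j) (hg : PySem.List.pyGet? pgm j = some tgt) :
    search pgm j c m =
      ((PySem.List.pyRange 0 8 1).filterMap (mkChild? j c m tgt)).foldl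
        (fun b s => merge b (aval pgm s)) (-1) := by
  have hjlt : j < (pgm.length : Int) := by
    by_contra hge
    have : PySem.List.pyGet? pgm j = none := by
      rw [PySem.List.pyGet?_eq_none_iff]
      intro hin; rcases hin with ⟨_, h2⟩; omega
    simp [this] at hg
  have hG : (((pgm.length : Int) - j).toNat) + 1 =
      ((((pgm.length : Int) - (j + 1)).toNat + 1)) + 1 := by omega
  rw [search, hG, searchFuel_expand pgm j c m tgt _ h0 hjlt hg]
  refine PySem.List.foldl_congr_mem _ _ _ _ ?_
  intro acc s hs
  rcases List.mem_filterMap.mp hs with ⟨i, _, hmk⟩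
  have h1 := mkChild?_fst j c m tgt i s hmk
  simp only [aval, search, h1]

-- The worklist invariant: running Source B's loop from any valid stack and running best
-- computes the merge-fold of A's values over the stack.
theorem runB_eq (pgm : List Int) :
    ∀ (stack : List (Int × Int × Int)) (best : Int),
      (∀ s ∈ stack, 0 ≤ s.1 ∧ s.1 ≤ (pgm.length : Int)) →
      runB pgm stack best = stack.foldl (fun b s => merge b (aval pgm s)) best := by
  intro stack best hv
  induction stack, best using runB.induct pgm with
  | case1 best => simp [runB]
  | case2 best c m rest ih =>
    have hvr : ∀ s ∈ rest, 0 ≤ s.1 ∧ s.1 ≤ (pgm.length : Int) := by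
      intro s hs; exact hv s (List.mem_cons_of_mem _ hs)
    simp only [runB, if_true]
    simp only [dite_eq_ite] at ih
    rw [ih hvr, List.foldl_cons]
    have hc : aval pgm ((pgm.length : Int), c, m) = c := search_complete pgm c m
    rw [hc]
    congr 1
    unfold merge
    split_ifs <;> first | rfl | omega
  | case3 best j c m rest hne hg ih =>
    exfalso
    have h := hv (j, c, m) List.mem_cons_self
    rw [PySem.List.pyGet?_eq_none_iff] at hg
    refine hg ⟨?_, ?_⟩ <;> omega
  | case4 best j c m rest hne tgt hg hj ih =>
    exfalso
    have h := hv (j, c, m) List.mem_cons_self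
    omega
  | case5 best j c m rest hne tgt hg hj ih =>
    rw [runB]
    simp only [if_neg hne]
    have hmatch : (match hmg : PySem.List.pyGet? pgm j with
        | none => runB pgm rest best
        | some tgt =>
          if _hj : j < 0 then runB pgm rest best
          else runB pgm (((PySem.List.pyRange 0 8 1).filterMap (mkChild? j c m tgt)).reverse ++ rest) best)
        = runB pgm (((PySem.List.pyRange 0 8 1).filterMap (mkChild? j c m tgt)).reverse ++ rest) best := by
      split
      · rename_i hnone
        rw [hg] at hnone
        cases hnone
      · rename_i tgt' hsome
        rw [hg] at hsome
        cases hsome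
        rw [dif_neg hj]
    rw [hmatch]
    have h := hv (j, c, m) List.mem_cons_self
    have hjlt : j < (pgm.length : Int) := by
      by_contra hge
      have hnone : PySem.List.pyGet? pgm j = none := by
        rw [PySem.List.pyGet?_eq_none_iff]
        intro hin; rcases hin with ⟨_, h2⟩; omega
      rw [hnone] at hg; cases hg
    have hvch : ∀ s ∈ ((PySem.List.pyRange 0 8 1).filterMap (mkChild? j c m tgt)).reverse ++ rest,
        0 ≤ s.1 ∧ s.1 ≤ (pgm.length : Int) := by
      intro s hs
      rcases List.mem_append.mp hs with hs | hs
      · rcases List.mem_filterMap.mp (List.mem_reverse.mp hs) with ⟨i, _, hmk⟩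
        have h1 := mkChild?_fst _ _ _ _ _ _ hmk
        omega
      · exact hv s (List.mem_cons_of_mem _ hs)
    rw [ih hvch, List.foldl_append, List.foldl_cons]
    congr 1
    rw [foldl_merge_factor (aval pgm) _ best, foldl_merge_reverse (aval pgm)]
    exact congrArg (merge best) (search_expand pgm j c m _ (by omega) hg).symm

-- ===== VERDICT (by name: the statement is the Claim_ definition above) =====
theorem search_spec : Claim_equal_search := by
  intro pgm idx cur mask _hdom hpre
  unfold Spec_search search_alt
  rw [runB_eq pgm [(idx, cur, mask)] (-1)
    (by intro s hs; simp at hs; subst hs; exact hpre)]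
  simp only [List.foldl_cons, List.foldl_nil, merge_neg_left]
  rfl
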